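-- pv_equiv track=rewrite | github.com/theeksha101/problem_solving | SolvedByMe/Between Two Sets.py | checkFactor
-- ===== SOURCE A (Python) =====
-- def checkFactor(numerator_set, denominator_set):
--     factors_set = []
--
--     for i in numerator_set:
--         check_factor = []
--         for j in denominator_set:
--             if i % j != 0:
--                 check_factor.append(1)
--         if len(check_factor) == 0:
--             factors_set.append(i)
--
--     return factors_set
-- ===== SOURCE B (Python) =====
-- def checkFactor(numerator_set, denominator_set):
--     def gcd(a, b):
--         return a if b == 0 else gcd(b, a % b)
--     l = 1
--     for j in denominator_set:
--         g = gcd(l, abs(j))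
--         l = 0 if g == 0 else l * abs(j) // g
--     return [i for i in numerator_set if i % l == 0]
-- ===== Notes on version B (the rewrite author's own statement) =====
-- stated objective: faster
-- what changed: Instead of testing every numerator against every denominator, B folds the denominators once into their least common multiple (via a hand-written Euclid gcd) and then filters numerators by a single divisibility test i % lcm == 0.
import Mathlib
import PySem

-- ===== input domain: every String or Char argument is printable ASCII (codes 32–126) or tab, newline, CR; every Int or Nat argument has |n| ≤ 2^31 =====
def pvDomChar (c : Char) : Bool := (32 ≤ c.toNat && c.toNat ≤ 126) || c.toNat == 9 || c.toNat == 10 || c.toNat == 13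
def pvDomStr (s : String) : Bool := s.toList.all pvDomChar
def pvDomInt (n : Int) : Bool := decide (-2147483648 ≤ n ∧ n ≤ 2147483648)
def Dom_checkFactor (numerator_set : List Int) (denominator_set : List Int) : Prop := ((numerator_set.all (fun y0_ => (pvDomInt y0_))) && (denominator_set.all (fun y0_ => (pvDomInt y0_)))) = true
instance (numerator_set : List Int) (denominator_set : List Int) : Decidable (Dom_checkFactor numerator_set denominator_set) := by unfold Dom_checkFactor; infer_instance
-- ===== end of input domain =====

-- B replaces A's numerator×denominator double loop by one fold computing the lcm of the
-- denominators (hand-written Euclid gcd) followed by a single-divisor filter; equivalence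
-- of the RETURN value is proved on inputs where Python's `%` raises no ZeroDivisionError.

-- ===== PORT A =====
-- literal transliteration of A's nested loops
def checkFactor (numerator_set : List Int) (denominator_set : List Int) : List Int :=
  numerator_set.foldl (fun factors_set i =>
    let check_factor : List Int :=
      denominator_set.foldl (fun check_factor j =>
        if PySem.Int.mod i j ≠ 0 then check_factor ++ [1] else check_factor) []
    if check_factor.length = 0 then factors_set ++ [i] else factors_set) []

-- ===== PORT B =====
-- Source B's recursive `gcd(a, b)`; Python's `%` is PySem.Int.mod
def pvGcdB (a b : Int) : Int :=
  if _h : b = 0 then a else pvGcdB b (PySem.Int.mod a b)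
termination_by b.natAbs
decreasing_by
  rcases lt_trichotomy b 0 with hb | hb | hb
  · have := PySem.Int.mod_neg_bounds a hb; omega
  · exact absurd hb _h
  · have h1 := PySem.Int.mod_nonneg a hb
    have h2 := PySem.Int.mod_lt a hb
    omega

-- Source B's lcm-accumulating loop body: `g = gcd(l, abs(j)); l = 0 if g == 0 else l * abs(j) // g`
def pvStepB (l j : Int) : Int :=
  let g := pvGcdB l |j|
  if g = 0 then 0 else PySem.Int.floordiv (l * |j|) g

def checkFactor_alt (numerator_set : List Int) (denominator_set : List Int) : List Int :=
  let l := denominator_set.foldl pvStepB 1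
  numerator_set.filter (fun i => PySem.Int.mod i l == 0)

-- ===== PRECONDITION & SPEC =====
-- Pre_ excludes exactly the inputs where Python A raises ZeroDivisionError: a zero
-- denominator actually reaching `i % j`, i.e. 0 ∈ denominator_set with a nonempty
-- numerator_set (B raises there too).
def Pre_checkFactor (numerator_set : List Int) (denominator_set : List Int) : Prop :=
  numerator_set = [] ∨ (0 : Int) ∉ denominator_set
instance (numerator_set : List Int) (denominator_set : List Int) : Decidable (Pre_checkFactor numerator_set denominator_set) := by unfold Pre_checkFactor; infer_instance

def pvWitness_checkFactor : List Int × List Int := ([12, 7, 24, 0, -24], [2, 3, -4])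

def Spec_checkFactor (numerator_set : List Int) (denominator_set : List Int) (out : List Int) : Prop := out = checkFactor_alt numerator_set denominator_set
instance (numerator_set : List Int) (denominator_set : List Int) (out : List Int) : Decidable (Spec_checkFactor numerator_set denominator_set out) := by unfold Spec_checkFactor; infer_instance

-- ===== CLAIM (what is proved, stated in full; the proofs are below) =====
def Claim_equal_checkFactor : Prop := ∀ (numerator_set : List Int) (denominator_set : List Int), Dom_checkFactor numerator_set denominator_set → Pre_checkFactor numerator_set denominator_set → Spec_checkFactor numerator_set denominator_set (checkFactor numerator_set denominator_set)

-- ===== LEMMAS AND PROOFS =====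

-- Source B's Euclid computes Int.gcd on nonnegative arguments
theorem pvGcdB_eq_gcd (n : Nat) : ∀ (a b : Int), b.natAbs ≤ n → 0 ≤ a → 0 ≤ b →
    pvGcdB a b = (Int.gcd a b : Int) := by
  induction n with
  | zero =>
    intro a b hbn ha _
    have hb0 : b = 0 := by omega
    rw [pvGcdB]
    simp [hb0, Int.gcd, Int.natAbs_of_nonneg ha]
  | succ n ih =>
    intro a b hbn ha hb
    rw [pvGcdB]
    by_cases h : b = 0
    · simp [h, Int.gcd, Int.natAbs_of_nonneg ha]
    · have hbpos : 0 < b := lt_of_le_of_ne hb (Ne.symm h)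
      simp only [h, dite_false]
      rw [PySem.Int.mod_eq_emod_of_pos hbpos]
      have hr0 : 0 ≤ a % b := Int.emod_nonneg a h
      have hrlt : a % b < b := Int.emod_lt_of_pos a hbpos
      rw [ih b (a % b) (by omega) hb hr0, Int.gcd_comm, Int.gcd_emod]

-- one step of Source B's loop is the (nonnegative) lcm
theorem pvStepB_eq_lcm (l j : Int) (hl : 0 ≤ l) : pvStepB l j = (Int.lcm l j : Int) := by
  have hg : pvGcdB l |j| = (Int.gcd l j : Int) := by
    rw [pvGcdB_eq_gcd |j|.natAbs l |j| le_rfl hl (abs_nonneg j)]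
    simp [Int.gcd, Int.natAbs_abs]
  show (if pvGcdB l |j| = 0 then 0 else PySem.Int.floordiv (l * |j|) (pvGcdB l |j|)) = _
  rw [hg]
  by_cases h0 : (Int.gcd l j : Int) = 0
  · have hz := Int.gcd_eq_zero_iff.mp (by exact_mod_cast h0)
    simp [hz.1, hz.2]
  · have hgpos : (0 : Int) < (Int.gcd l j : Int) :=
      lt_of_le_of_ne (Int.natCast_nonneg _) (Ne.symm h0)
    rw [if_neg h0, PySem.Int.floordiv_eq_ediv_of_pos hgpos]
    have hmul : l * |j| = ((l.natAbs * j.natAbs : Nat) : Int) := by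
      rw [Int.natCast_mul, Int.natCast_natAbs, Int.natCast_natAbs, abs_of_nonneg hl]
    rw [hmul, show (Int.gcd l j : Int) = ((l.natAbs.gcd j.natAbs : Nat) : Int) from rfl,
      ← Int.natCast_ediv]
    rfl

-- Source B's fold equals folding with Int.lcm
theorem foldl_pvStepB_eq (ds : List Int) : ∀ (l0 : Int), 0 ≤ l0 →
    ds.foldl pvStepB l0 = ds.foldl (fun a j => ((Int.lcm a j : Nat) : Int)) l0 := by
  induction ds with
  | nil => intro l0 _; rfl
  | cons j t ih =>
    intro l0 hl0
    simp only [List.foldl_cons]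
    rw [pvStepB_eq_lcm l0 j hl0, ih _ (Int.natCast_nonneg _)]

-- divisibility by the folded lcm is simultaneous divisibility
theorem foldl_lcm_dvd (ds : List Int) : ∀ (l0 c : Int),
    (ds.foldl (fun a j => ((Int.lcm a j : Nat) : Int)) l0 ∣ c) ↔ (l0 ∣ c ∧ ∀ j ∈ ds, j ∣ c) := by
  induction ds with
  | nil => intro l0 c; simp
  | cons j t ih =>
    intro l0 c
    simp only [List.foldl_cons, List.mem_cons]
    rw [ih]
    have : ((Int.lcm l0 j : Nat) : Int) ∣ c ↔ l0 ∣ c ∧ j ∣ c := by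
      rw [Int.coe_lcm]; exact lcm_dvd_iff
    rw [this]
    constructor
    · rintro ⟨⟨h1, h2⟩, h3⟩
      exact ⟨h1, fun x hx => hx.elim (fun he => he ▸ h2) (h3 x)⟩
    · rintro ⟨h1, h2⟩
      exact ⟨⟨h1, h2 j (Or.inl rfl)⟩, fun x hx => h2 x (Or.inr hx)⟩

-- A's inner loop leaves check_factor empty iff every denominator divides i
theorem inner_empty_iff (ds : List Int) (i : Int) :
    ((ds.foldl (fun check_factor j =>
        if PySem.Int.mod i j ≠ 0 then check_factor ++ [(1 : Int)] else check_factor) []).length = 0)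
      ↔ ∀ j ∈ ds, PySem.Int.mod i j = 0 := by
  rw [PySem.List.foldl_append_ite (p := fun j => PySem.Int.mod i j ≠ 0) (f := fun _ => (1 : Int))]
  simp [List.filter_eq_nil_iff]

-- ===== VERDICT (by name: the statement is the Claim_ definition above) =====
theorem checkFactor_spec : Claim_equal_checkFactor := by
  intro ns ds _dom _pre
  unfold Spec_checkFactor checkFactor checkFactor_alt
  rw [PySem.List.foldl_append_ite_eq_filter
    (p := fun i => (ds.foldl (fun check_factor j =>
      if PySem.Int.mod i j ≠ 0 then check_factor ++ [(1 : Int)] else check_factor) []).length = 0)]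
  simp only [List.nil_append]
  apply List.filter_congr
  intro i _
  have hchain : (∀ j ∈ ds, PySem.Int.mod i j = 0) ↔
      PySem.Int.mod i (ds.foldl pvStepB 1) = 0 := by
    rw [PySem.Int.mod_eq_zero_iff_dvd, foldl_pvStepB_eq ds 1 (by norm_num), foldl_lcm_dvd]
    simp only [one_dvd, true_and]
    constructor
    · intro h j hj; rw [← PySem.Int.mod_eq_zero_iff_dvd]; exact h j hj
    · intro h j hj; rw [PySem.Int.mod_eq_zero_iff_dvd]; exact h j hj
  rw [show ((PySem.Int.mod i (ds.foldl pvStepB 1) == 0)) = decide (PySem.Int.mod i (ds.foldl pvStepB 1) = 0) from rfl]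
  rw [decide_eq_decide]
  rw [inner_empty_iff]
  exact hchain
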